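-- pv_equiv track=rewrite | github.com/solyankastayl-cyber/ttrewaasad11444 | backend/modules/orchestrator/final_gate.py | get_strategy_policy
-- ===== SOURCE A (Python) =====
-- from typing import Dict, Any, Optional, List
--
-- def get_strategy_policy(meta_actions: List[Dict[str, Any]], strategy_id: str) -> Dict[str, bool]:
--     """
--     Extract strategy policy from meta actions.
--
--     Args:
--         meta_actions: List of meta-level policy actions
--         strategy_id: Strategy to check
--
--     Returns:
--         Policy flags: disabled, capped, boosted
--     """
--     policy = {
--         "disabled": False,
--         "capped": False,
--         "boosted": False,
--     }
--
--     for action in (meta_actions or []):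
--         if action.get("strategy_id") != strategy_id:
--             continue
--
--         action_type = action.get("type")
--         if action_type == "DISABLE_STRATEGY":
--             policy["disabled"] = True
--         elif action_type == "CAP_STRATEGY":
--             policy["capped"] = True
--         elif action_type == "BOOST_STRATEGY":
--             policy["boosted"] = True
--
--     return policy
-- ===== SOURCE B (Python) =====
-- _FLAG_TYPES = [
--     ("disabled", "DISABLE_STRATEGY"),
--     ("capped", "CAP_STRATEGY"),
--     ("boosted", "BOOST_STRATEGY"),
-- ]
--
-- def get_strategy_policy(meta_actions, strategy_id):
--     actions = meta_actions or []
--     return {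
--         key: any(a.get("strategy_id") == strategy_id and a.get("type") == t
--                  for a in actions)
--         for key, t in _FLAG_TYPES
--     }
-- ===== Notes on version B (the rewrite author's own statement) =====
-- stated objective: simpler
-- what changed: Inverts the loop nesting: a table of (flag, action_type) pairs drives a dict comprehension where each flag is computed by its own any() scan over the actions, instead of A's single pass with per-element if/elif dispatch mutating a dict.
import Mathlib
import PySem

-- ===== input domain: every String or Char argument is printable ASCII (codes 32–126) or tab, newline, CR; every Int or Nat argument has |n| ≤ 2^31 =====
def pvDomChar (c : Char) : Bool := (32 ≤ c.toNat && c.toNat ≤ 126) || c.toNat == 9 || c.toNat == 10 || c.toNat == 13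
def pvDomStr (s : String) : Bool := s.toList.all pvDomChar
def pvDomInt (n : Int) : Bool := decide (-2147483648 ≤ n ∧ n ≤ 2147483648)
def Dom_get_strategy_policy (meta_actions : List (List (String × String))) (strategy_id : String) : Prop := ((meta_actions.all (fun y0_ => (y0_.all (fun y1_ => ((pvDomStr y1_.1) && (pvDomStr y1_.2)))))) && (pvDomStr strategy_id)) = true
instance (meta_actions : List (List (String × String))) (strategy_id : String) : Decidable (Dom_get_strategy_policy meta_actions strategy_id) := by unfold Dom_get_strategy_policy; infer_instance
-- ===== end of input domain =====

-- B inverts the loop nesting: a table of (flag, action_type) pairs drives the result, each flag computed by its own any-scan over the actions (simpler, table-driven).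


-- dict.get(k): first match in the association list (None = missing key)
def pvGetKey (d : List (String × String)) (k : String) : Option String :=
  (d.find? (fun p => p.1 == k)).map (·.2)

-- ===== PORT A =====
-- the loop over (meta_actions or []) carrying the mutable policy dict as three flags
def pvStepA (strategy_id : String) (st : Bool × Bool × Bool) (action : List (String × String)) : Bool × Bool × Bool :=
  if pvGetKey action "strategy_id" ≠ some strategy_id then st
  else
    let action_type := pvGetKey action "type"
    if action_type = some "DISABLE_STRATEGY" then (true, st.2.1, st.2.2)
    else if action_type = some "CAP_STRATEGY" then (st.1, true, st.2.2)
    else if action_type = some "BOOST_STRATEGY" then (st.1, st.2.1, true)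
    else st

def get_strategy_policy (meta_actions : List (List (String × String))) (strategy_id : String) : List (String × Bool) :=
  let st := meta_actions.foldl (pvStepA strategy_id) (false, false, false)
  [("disabled", st.1), ("capped", st.2.1), ("boosted", st.2.2)]

-- ===== PORT B =====
-- the _FLAG_TYPES table of Source B
def pvFlagTypes : List (String × String) :=
  [("disabled", "DISABLE_STRATEGY"), ("capped", "CAP_STRATEGY"), ("boosted", "BOOST_STRATEGY")]

def get_strategy_policy_alt (meta_actions : List (List (String × String))) (strategy_id : String) : List (String × Bool) :=
  pvFlagTypes.map (fun kt =>
    (kt.1, meta_actions.any (fun a =>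
      pvGetKey a "strategy_id" == some strategy_id && pvGetKey a "type" == some kt.2)))

-- ===== PRECONDITION & SPEC =====
def Spec_get_strategy_policy (meta_actions : List (List (String × String))) (strategy_id : String) (out : List (String × Bool)) : Prop := out = get_strategy_policy_alt meta_actions strategy_id
instance (meta_actions : List (List (String × String))) (strategy_id : String) (out : List (String × Bool)) : Decidable (Spec_get_strategy_policy meta_actions strategy_id out) := by unfold Spec_get_strategy_policy; infer_instance

-- ===== CLAIM (what is proved, stated in full; the proofs are below) =====
def Claim_equal_get_strategy_policy : Prop := ∀ (meta_actions : List (List (String × String))) (strategy_id : String), Dom_get_strategy_policy meta_actions strategy_id → Spec_get_strategy_policy meta_actions strategy_id (get_strategy_policy meta_actions strategy_id)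

-- ===== LEMMAS AND PROOFS =====

def pvHit (strategy_id t : String) (a : List (String × String)) : Bool :=
  (pvGetKey a "strategy_id" == some strategy_id) && (pvGetKey a "type" == some t)

lemma foldlA_any (strategy_id : String) (l : List (List (String × String))) (st : Bool × Bool × Bool) :
    l.foldl (pvStepA strategy_id) st =
      (st.1 || l.any (pvHit strategy_id "DISABLE_STRATEGY"),
       st.2.1 || l.any (pvHit strategy_id "CAP_STRATEGY"),
       st.2.2 || l.any (pvHit strategy_id "BOOST_STRATEGY")) := by
  induction l generalizing st with
  | nil => simp
  | cons a l ih =>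
    simp only [List.foldl_cons, List.any_cons, ih]
    obtain ⟨d, c, b⟩ := st
    simp only [pvStepA, pvHit]
    by_cases h : pvGetKey a "strategy_id" = some strategy_id
    · rcases ht : pvGetKey a "type" with _ | t
      · simp [h]
      · by_cases h1 : t = "DISABLE_STRATEGY"
        · subst h1; simp [h]
        · by_cases h2 : t = "CAP_STRATEGY"
          · subst h2; simp [h, h1]
          · by_cases h3 : t = "BOOST_STRATEGY"
            · subst h3; simp [h, h1, h2]
            · have e1 : (t == "DISABLE_STRATEGY") = false := by simpa using h1
              have e2 : (t == "CAP_STRATEGY") = false := by simpa using h2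
              have e3 : (t == "BOOST_STRATEGY") = false := by simpa using h3
              simp [h, h1, h2, h3, e1, e2, e3]
    · have e : (pvGetKey a "strategy_id" == some strategy_id) = false := by simpa using h
      simp [h, e]

-- ===== VERDICT (by name: the statement is the Claim_ definition above) =====
theorem get_strategy_policy_spec : Claim_equal_get_strategy_policy := by
  intro meta_actions strategy_id _
  unfold Spec_get_strategy_policy get_strategy_policy get_strategy_policy_alt
  simp only [foldlA_any, Bool.false_or, pvFlagTypes, List.map_cons, List.map_nil]
  rfl
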